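-- pv_equiv track=rewrite | github.com/uiamn/typical90 | 74.py | f
-- ===== SOURCE A (Python) =====
-- def f(s: str) -> int:
--     if s == '':
--         return 0
--     elif s[-1] == 'a':
--         return f(s[:-1])
--     elif s[-1] == 'b':
--         n = len(s) - 1
--         return f(s[:-1]) + (2**n - 1) + 1
--     else:
--         n = len(s) - 1
--         return f(s[:-1]) + 2* ((2**n - 1) + 1)
-- ===== SOURCE B (Python) =====
-- def f(s: str) -> int:
--     total = 0
--     for i, ch in enumerate(s):
--         w = 0 if ch == 'a' else 1 if ch == 'b' else 2
--         total += w * (1 << i)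
--     return total
-- ===== Notes on version B (the rewrite author's own statement) =====
-- stated objective: faster
-- what changed: Replaces the tail-stripping recursion (one string slice and 2**n-1 arithmetic per call) by a single forward loop accumulating weight(ch)*2^i per character.
import Mathlib
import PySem

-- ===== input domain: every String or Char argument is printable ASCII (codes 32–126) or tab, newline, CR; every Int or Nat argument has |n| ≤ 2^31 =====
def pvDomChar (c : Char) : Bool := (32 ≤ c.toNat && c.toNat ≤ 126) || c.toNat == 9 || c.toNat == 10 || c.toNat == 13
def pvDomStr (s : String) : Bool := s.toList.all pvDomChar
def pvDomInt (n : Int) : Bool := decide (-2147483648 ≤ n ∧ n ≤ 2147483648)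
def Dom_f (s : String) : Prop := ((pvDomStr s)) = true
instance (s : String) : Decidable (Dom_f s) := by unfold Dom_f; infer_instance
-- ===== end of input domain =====

-- B replaces A's tail-stripping recursion by one forward loop accumulating weight(ch)*2^i (simpler).

-- ===== PORT A =====
-- A recurses on s[:-1], branching on the last character s[-1].
def fA (l : List Char) : Int :=
  if h : l = [] then 0
  else if l.getLast h = 'a' then fA l.dropLast
  else if l.getLast h = 'b' then
    fA l.dropLast + ((2 : Int) ^ (l.length - 1) - 1) + 1
  else
    fA l.dropLast + 2 * (((2 : Int) ^ (l.length - 1) - 1) + 1)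
termination_by l.length
decreasing_by
  all_goals (have := List.length_pos_iff.mpr h; simp [List.length_dropLast]; omega)

def f (s : String) : Int := fA s.toList

-- ===== PORT B =====
-- weight of a character (0/'a', 1/'b', 2 otherwise)
def wgt (c : Char) : Int := if c = 'a' then 0 else if c = 'b' then 1 else 2

-- the enumerate loop: index i, running total acc
def altAux : List Char → Nat → Int → Int
  | [], _, acc => acc
  | c :: t, i, acc => altAux t (i + 1) (acc + wgt c * (2 : Int) ^ i)

def f_alt (s : String) : Int := altAux s.toList 0 0

-- ===== PRECONDITION & SPEC =====
def Spec_f (s : String) (out : Int) : Prop := out = f_alt s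
instance (s : String) (out : Int) : Decidable (Spec_f s out) := by unfold Spec_f; infer_instance

-- ===== CLAIM (what is proved, stated in full; the proofs are below) =====
def Claim_equal_f : Prop := ∀ (s : String), Dom_f s → Spec_f s (f s)

-- ===== LEMMAS AND PROOFS =====

theorem altAux_append (xs : List Char) (x : Char) (i : Nat) (acc : Int) :
    altAux (xs ++ [x]) i acc = altAux xs i acc + wgt x * (2 : Int) ^ (i + xs.length) := by
  induction xs generalizing i acc with
  | nil => simp [altAux]
  | cons c t ih =>
      simp only [List.cons_append, altAux, ih, List.length_cons]
      rw [show i + (t.length + 1) = i + 1 + t.length from by omega]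

theorem fA_concat (xs : List Char) (x : Char) :
    fA (xs ++ [x]) = fA xs + wgt x * (2 : Int) ^ xs.length := by
  rw [fA]
  have hne : xs ++ [x] ≠ [] := by simp
  rw [dif_neg hne]
  simp only [List.getLast_concat, List.dropLast_concat, List.length_append,
    List.length_cons, List.length_nil]
  have hlen : xs.length + 1 - 1 = xs.length := by omega
  rw [hlen]
  unfold wgt
  split_ifs <;> ring

theorem fA_eq_altAux (l : List Char) : fA l = altAux l 0 0 := by
  induction l using List.reverseRecOn with
  | nil => simp [fA, altAux]
  | append_singleton xs x ih =>
      rw [fA_concat, altAux_append, ih]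
      simp

-- ===== VERDICT (by name: the statement is the Claim_ definition above) =====
theorem f_spec : Claim_equal_f := by
  intro s _
  unfold Spec_f f f_alt
  exact fA_eq_altAux s.toList
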